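-- pv_equiv track=rewrite | github.com/kaelemc/US18741 | fines.py | CalculateFines
-- ===== SOURCE A (Python) =====
-- fine_ranges = [[0,10],[11,15],[16,20],[21,25],[26,31],[31,35],[36,40],[41,45]]
--
-- fines = [30, 80, 120, 170, 230, 300, 400, 510, 630]
--
-- def CalculateFines(speed, speed_limit):
--     over = speed - speed_limit
--     if over <= 0:
--         return None
--     elif over > fine_ranges[len(fine_ranges)-1][0]:
--         return fines[len(fines)-1]    # return the last fine in the list
--     else:
--         for i, x in reversed(list(enumerate(fine_ranges))):
--             if over >= fine_ranges[i][0]: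
--                 return fines[i]
--                 break
-- ===== SOURCE B (Python) =====
-- # B: binary-search (bisect_right by hand) over precomputed lower-bound thresholds
-- # instead of A's reversed linear scan over enumerated ranges.
-- fines = [30, 80, 120, 170, 230, 300, 400, 510, 630]
-- _thresholds = [0, 11, 16, 21, 26, 31, 36, 41]
--
-- def _bisect_right(xs, v, lo, hi):
--     while lo < hi:
--         mid = (lo + hi) // 2
--         if v < xs[mid]:
--             hi = mid
--         else:
--             lo = mid + 1
--     return lo
--
-- def CalculateFines(speed, speed_limit):
--     over = speed - speed_limit
--     if over <= 0:
--         return None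
--     if over > _thresholds[-1]:
--         return fines[-1]
--     return fines[_bisect_right(_thresholds, over, 0, len(_thresholds)) - 1]
-- ===== Notes on version B (the rewrite author's own statement) =====
-- stated objective: alternative
-- what changed: Replaces A's reversed linear scan over enumerate(fine_ranges) with a hand-written bisect_right binary search over precomputed lower-bound thresholds, indexing fines directly.
import Mathlib
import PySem

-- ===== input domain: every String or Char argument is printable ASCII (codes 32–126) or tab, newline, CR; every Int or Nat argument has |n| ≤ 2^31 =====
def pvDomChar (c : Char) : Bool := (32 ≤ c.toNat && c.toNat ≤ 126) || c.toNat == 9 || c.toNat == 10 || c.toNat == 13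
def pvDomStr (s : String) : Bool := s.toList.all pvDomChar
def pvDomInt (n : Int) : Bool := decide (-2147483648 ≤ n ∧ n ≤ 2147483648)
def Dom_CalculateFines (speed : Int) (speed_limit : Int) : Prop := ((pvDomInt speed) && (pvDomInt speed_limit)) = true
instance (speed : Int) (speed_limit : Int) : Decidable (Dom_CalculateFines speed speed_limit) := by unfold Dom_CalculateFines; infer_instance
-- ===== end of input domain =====

-- B replaces A's reversed linear scan of the bracket table by a hand-written
-- bisect_right binary search ov the precomputed lower-bound thresholds.

-- ===== PORT A =====
def fineRanges : List (List Int) := [[0,10],[11,15],[16,20],[21,25],[26,31],[31,35],[36,40],[41,45]]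
def finesA : List Int := [30, 80, 120, 170, 230, 300, 400, 510, 630]

-- the 'for i, x in reversed(list(enumerate(fine_ranges)))' loop of A
def fineLoopA (ov : Int) : List (Int × List Int) → Option Int
  | [] => none
  | (i, _x) :: rest =>
      if ov ≥ (PySem.List.pyGet? ((PySem.List.pyGet? fineRanges i).getD []) 0).getD 0 then
        PySem.List.pyGet? finesA i
      else fineLoopA ov rest

def CalculateFines (speed : Int) (speed_limit : Int) : Option Int :=
  let ov := speed - speed_limit
  if ov ≤ 0 then none
  else if ov > (PySem.List.pyGet? ((PySem.List.pyGet? fineRanges (Int.ofNat fineRanges.length - 1)).getD []) 0).getD 0 then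
    PySem.List.pyGet? finesA (Int.ofNat finesA.length - 1)
  else fineLoopA ov (PySem.List.enumerate fineRanges).reverse

-- ===== PORT B =====
def finesB : List Int := [30, 80, 120, 170, 230, 300, 400, 510, 630]
def thresholdsB : List Int := [0, 11, 16, 21, 26, 31, 36, 41]

-- Source B's while-loop binary search; fuel = initial hi bounds the iteration count (totality guard only)
def bisectRight (xs : List Int) (v : Int) : Nat → Nat → Nat → Nat
  | 0, lo, _ => lo
  | fuel + 1, lo, hi =>
      if lo < hi then
        let mid := (lo + hi) / 2
        if v < (PySem.List.pyGet? xs (Int.ofNat mid)).getD 0 then bisectRight xs v fuel lo mid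
        else bisectRight xs v fuel (mid + 1) hi
      else lo

def CalculateFines_alt (speed : Int) (speed_limit : Int) : Option Int :=
  let ov := speed - speed_limit
  if ov ≤ 0 then none
  else if ov > (PySem.List.pyGet? thresholdsB (-1)).getD 0 then PySem.List.pyGet? finesB (-1)
  else PySem.List.pyGet? finesB
    (Int.ofNat (bisectRight thresholdsB ov thresholdsB.length 0 thresholdsB.length) - 1)

-- ===== PRECONDITION & SPEC =====
def Spec_CalculateFines (speed : Int) (speed_limit : Int) (out : Option Int) : Prop := out = CalculateFines_alt speed speed_limit
instance (speed : Int) (speed_limit : Int) (out : Option Int) : Decidable (Spec_CalculateFines speed speed_limit out) := by unfold Spec_CalculateFines; infer_instance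

-- ===== CLAIM (what is proved, stated in full; the proofs are below) =====
def Claim_equal_CalculateFines : Prop := ∀ (speed : Int) (speed_limit : Int), Dom_CalculateFines speed speed_limit → Spec_CalculateFines speed speed_limit (CalculateFines speed speed_limit)

-- ===== LEMMAS AND PROOFS =====

lemma calc_eq (s l : Int) : CalculateFines s l = CalculateFines_alt s l := by
  unfold CalculateFines CalculateFines_alt
  generalize s - l = o
  by_cases h0 : o ≤ 0
  · simp [h0]
  · have hA : (PySem.List.pyGet? ((PySem.List.pyGet? fineRanges (Int.ofNat fineRanges.length - 1)).getD []) 0).getD 0 = 41 := by decide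
    have hB : (PySem.List.pyGet? thresholdsB (-1)).getD 0 = 41 := by decide
    rw [hA, hB, if_neg h0, if_neg h0]
    by_cases h41 : o > 41
    · rw [if_pos h41, if_pos h41]
      decide
    · rw [if_neg h41, if_neg h41]
      have h1 : 1 ≤ o := by omega
      have h2 : o ≤ 41 := by omega
      interval_cases o <;> decide

-- ===== VERDICT (by name: the statement is the Claim_ definition above) =====
theorem CalculateFines_spec : Claim_equal_CalculateFines := by
  intro s l _
  unfold Spec_CalculateFines
  exact calc_eq s l
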